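-- pv_equiv track=rewrite | github.com/cs231907-oss/C_learning_gap_analyzer | C_learning_gap_analyzer.py | extract_format_scanf_specifiers
-- ===== SOURCE A (Python) =====
-- def extract_format_scanf_specifiers(line):
--     specs=[]
--     in_string = False
--     buffer = ""
--
--     for char in line:
--         if char == '"':
--             in_string = not in_string
--             buffer=""
--             continue
--
--         if in_string:
--             buffer += char
--             if buffer.endswith(("%d","%f", "%c", "%s", "%p")):
--                 specs.append(buffer[-2:])
--
--     return specs
-- ===== SOURCE B (Python) =====
-- def extract_format_scanf_specifiers(line):
--     specs = []
--     for piece in line.split('"')[1::2]: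
--         for i in range(len(piece) - 1):
--             if piece[i] == '%' and piece[i + 1] in 'dfcsp':
--                 specs.append(piece[i:i + 2])
--     return specs
-- ===== Notes on version B (the rewrite author's own statement) =====
-- stated objective: faster
-- what changed: Replaces A's single stateful character loop (an in-string flag plus an ever-growing buffer re-checked with endswith) by splitting the line at quote characters and scanning only the odd-indexed (in-string) pieces for adjacent percent+specifier pairs.
import Mathlib
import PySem

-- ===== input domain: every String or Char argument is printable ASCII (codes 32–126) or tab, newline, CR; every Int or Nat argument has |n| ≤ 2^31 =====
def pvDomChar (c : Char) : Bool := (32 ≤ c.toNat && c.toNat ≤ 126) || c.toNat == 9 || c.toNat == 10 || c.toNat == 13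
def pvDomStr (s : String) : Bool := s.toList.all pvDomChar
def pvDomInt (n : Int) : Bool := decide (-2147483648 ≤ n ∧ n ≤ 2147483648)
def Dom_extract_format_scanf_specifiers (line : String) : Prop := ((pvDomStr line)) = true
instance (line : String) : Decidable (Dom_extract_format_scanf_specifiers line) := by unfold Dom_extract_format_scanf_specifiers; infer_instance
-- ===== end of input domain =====

-- B replaces A's stateful char loop with a growing buffer by split-on-quote then a
-- per-segment adjacent-pair scan (measured faster by a constant factor).

-- ===== PORT A =====
-- the tuple of suffixes from A's `buffer.endswith(("%d","%f","%c","%s","%p"))`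
def pvTails : List (List Char) := [['%','d'], ['%','f'], ['%','c'], ['%','s'], ['%','p']]

-- one iteration of A's `for char in line` loop; state = (specs, in_string, buffer)
def pvStepA (st : List String × Bool × List Char) (c : Char) : List String × Bool × List Char :=
  if c = '"' then (st.1, !st.2.1, [])
  else if st.2.1 then
    let buf := st.2.2 ++ [c]            -- buffer += char
    if pvTails.any (fun t => t.isSuffixOf buf) then   -- buffer.endswith((...))
      (st.1 ++ [String.ofList (buf.drop (buf.length - 2))], st.2.1, buf)   -- specs.append(buffer[-2:])
    else (st.1, st.2.1, buf)
  else st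

def extract_format_scanf_specifiers (line : String) : List String :=
  (line.toList.foldl pvStepA ([], false, [])).1

-- ===== PORT B =====
-- `piece[i+1] in 'dfcsp'`
def pvIsSpec (c : Char) : Bool := c = 'd' || c = 'f' || c = 'c' || c = 's' || c = 'p'

-- Source B's inner loop `for i in range(len(piece)-1)` as a scan over adjacent pairs
def pvScanFrom (a : Char) : List Char → List String
  | [] => []
  | b :: r => (if a = '%' && pvIsSpec b then [String.ofList [a, b]] else []) ++ pvScanFrom b r

def pvScanSeg : List Char → List String
  | [] => []
  | a :: r => pvScanFrom a r

-- pieces[1::2] as recursion over pairs of pieces (exact for step-2 slicing from index 1)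
def pvOdds {α : Type} : List α → List α
  | _ :: b :: rest => b :: pvOdds rest
  | _ => []

def extract_format_scanf_specifiers_alt (line : String) : List String :=
  -- line.split('"') is exactly List.splitOn '"' on the character list (empty pieces kept)
  let pieces := line.toList.splitOn '"'
  (pvOdds pieces).foldl (fun acc seg => acc ++ pvScanSeg seg) []

-- ===== PRECONDITION & SPEC =====
def Spec_extract_format_scanf_specifiers (line : String) (out : List String) : Prop := out = extract_format_scanf_specifiers_alt line
instance (line : String) (out : List String) : Decidable (Spec_extract_format_scanf_specifiers line out) := by unfold Spec_extract_format_scanf_specifiers; infer_instance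

-- ===== CLAIM (what is proved, stated in full; the proofs are below) =====
def Claim_equal_extract_format_scanf_specifiers : Prop := ∀ (line : String), Dom_extract_format_scanf_specifiers line → Spec_extract_format_scanf_specifiers line (extract_format_scanf_specifiers line)

-- ===== LEMMAS AND PROOFS =====

-- abstraction of A's loop: only the last buffer character matters
def pvEmit (prev : Option Char) (c : Char) : List String :=
  if prev = some '%' && pvIsSpec c then [String.ofList ['%', c]] else []

def pvRunOut : Bool → Option Char → List Char → List String
  | _, _, [] => []
  | inStr, prev, c :: rest =>
    if c = '"' then pvRunOut (!inStr) none rest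
    else if inStr then pvEmit prev c ++ pvRunOut true (some c) rest
    else pvRunOut inStr prev rest

lemma pair_suffix (a b c : Char) (l : List Char) :
    ([a, b].isSuffixOf (l ++ [c]) = true) ↔ (l.getLast? = some a ∧ c = b) := by
  rw [List.isSuffixOf_iff_suffix]
  constructor
  · rintro ⟨t, ht⟩
    have h1 : (t ++ [a]) ++ [b] = l ++ [c] := by simpa using ht
    have hc : b = c := by
      have h2 := congrArg List.getLast? h1
      simpa [List.getLast?_concat] using h2
    have hl : t ++ [a] = l := by
      have h2 := congrArg List.dropLast h1
      simpa [List.dropLast_concat] using h2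
    exact ⟨by rw [← hl]; exact List.getLast?_concat, hc.symm⟩
  · rintro ⟨hl, rfl⟩
    obtain ⟨ys, rfl⟩ := List.getLast?_eq_some_iff.mp hl
    exact ⟨ys, by simp⟩

lemma anyTails (buf : List Char) (c : Char) :
    (pvTails.any (fun t => t.isSuffixOf (buf ++ [c])) = true) ↔
      (buf.getLast? = some '%' ∧ pvIsSpec c = true) := by
  simp only [pvTails, List.any_cons, List.any_nil, Bool.or_eq_true, Bool.or_false,
    pair_suffix, pvIsSpec, decide_eq_true_eq]
  constructor <;> (intro hcase; tauto)

lemma foldA (chars : List Char) : ∀ (specs : List String) (inStr : Bool) (buf : List Char),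
    (List.foldl pvStepA (specs, inStr, buf) chars).1 = specs ++ pvRunOut inStr buf.getLast? chars := by
  induction chars with
  | nil => intro specs inStr buf; simp [pvRunOut]
  | cons c rest ih =>
    intro specs inStr buf
    simp only [List.foldl_cons]
    by_cases hq : c = '"'
    · subst hq
      rw [show pvStepA (specs, inStr, buf) '"' = (specs, !inStr, []) from by simp [pvStepA]]
      rw [ih, show pvRunOut inStr buf.getLast? ('"' :: rest) = pvRunOut (!inStr) none rest from by
        simp [pvRunOut]]
      rfl
    · cases inStr with
      | false =>
        rw [show pvStepA (specs, false, buf) c = (specs, false, buf) from by simp [pvStepA, hq]]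
        rw [ih, show pvRunOut false buf.getLast? (c :: rest) = pvRunOut false buf.getLast? rest from by
          simp [pvRunOut, hq]]
      | true =>
        rw [show pvRunOut true buf.getLast? (c :: rest)
              = pvEmit buf.getLast? c ++ pvRunOut true (some c) rest from by
          simp [pvRunOut, hq]]
        by_cases hm : buf.getLast? = some '%' ∧ pvIsSpec c = true
        · obtain ⟨ys, hys⟩ := List.getLast?_eq_some_iff.mp hm.1
          have hdrop : (buf ++ [c]).drop ((buf ++ [c]).length - 2) = ['%', c] := by
            subst hys
            rw [show ys ++ ['%'] ++ [c] = ys ++ ['%', c] from by simp]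
            simp only [List.length_append, List.length_cons, List.length_nil]
            rw [show ys.length + (1 + 1) - 2 = ys.length from by omega]
            exact List.drop_left
          rw [show pvStepA (specs, true, buf) c
                = (specs ++ [String.ofList ((buf ++ [c]).drop ((buf ++ [c]).length - 2))], true, buf ++ [c]) from by
            simp [pvStepA, hq, (anyTails buf c).mpr hm]]
          rw [ih, hdrop, List.getLast?_concat]
          rw [show pvEmit buf.getLast? c = [String.ofList ['%', c]] from by
            simp [pvEmit, hm.1, hm.2]]
          simp
        · have hany : (pvTails.any fun t => t.isSuffixOf (buf ++ [c])) = false :=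
            Bool.eq_false_iff.mpr (fun hh => hm ((anyTails buf c).mp hh))
          rw [show pvStepA (specs, true, buf) c = (specs, true, buf ++ [c]) from by
            simp [pvStepA, hq, hany]]
          rw [ih, List.getLast?_concat]
          rw [show pvEmit buf.getLast? c = [] from by
            unfold pvEmit
            rw [if_neg]
            intro hcon
            simp only [Bool.and_eq_true, decide_eq_true_eq] at hcon
            exact hm ⟨hcon.1, hcon.2⟩]
          simp

-- pvWith prev seg: what the in-string machine emits over a whole quote-free segment
def pvWith : Option Char → List Char → List String
  | none => pvScanSeg
  | some a => pvScanFrom a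

lemma pvOdds_cons_cons {α : Type} (x y : α) (r : List α) : pvOdds (x :: y :: r) = y :: pvOdds r := rfl

lemma pvOdds_head {α : Type} (x y : α) (t : List α) : pvOdds (x :: t) = pvOdds (y :: t) := by
  cases t <;> rfl

lemma pvWith_cons (prev : Option Char) (c : Char) (h : List Char) :
    pvWith prev (c :: h) = pvEmit prev c ++ pvScanFrom c h := by
  cases prev with
  | none => simp [pvWith, pvScanSeg, pvEmit]
  | some a =>
    by_cases ha : a = '%'
    · subst ha; simp [pvWith, pvScanFrom, pvEmit]
    · simp [pvWith, pvScanFrom, pvEmit, ha]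

lemma runOut_split (chars : List Char) :
    (pvRunOut false none chars = (pvOdds (chars.splitOn '"')).flatMap pvScanSeg) ∧
    (∀ prev : Option Char, pvRunOut true prev chars =
      pvWith prev (chars.splitOn '"').headI
        ++ (pvOdds (chars.splitOn '"').tail).flatMap pvScanSeg) := by
  induction chars with
  | nil =>
    constructor
    · simp [pvRunOut, List.splitOn, List.splitOnP_nil, pvOdds]
    · intro prev
      cases prev <;>
        simp [pvRunOut, List.splitOn, List.splitOnP_nil, pvWith, pvScanSeg, pvScanFrom, pvOdds]
  | cons c rest ih =>
    obtain ⟨h, t, hS⟩ := List.exists_cons_of_ne_nil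
      (show rest.splitOn '"' ≠ [] from List.splitOnP_ne_nil _ rest)
    by_cases hq : c = '"'
    · subst hq
      have hsplit : (('"' :: rest).splitOn '"') = [] :: h :: t := by
        simp only [List.splitOn, List.splitOnP_cons, beq_self_eq_true, if_true]
        rw [show List.splitOnP (· == '"') rest = rest.splitOn '"' from rfl, hS]
      constructor
      · rw [show pvRunOut false none ('"' :: rest) = pvRunOut true none rest from by
            simp [pvRunOut], ih.2 none, hsplit, hS]
        simp [pvWith, pvOdds_cons_cons]
      · intro prev
        rw [show pvRunOut true prev ('"' :: rest) = pvRunOut false none rest from by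
            simp [pvRunOut], ih.1, hsplit, hS]
        cases prev <;> simp [pvWith, pvScanSeg, pvScanFrom]
    · have hsplit : ((c :: rest).splitOn '"') = (c :: h) :: t := by
        simp only [List.splitOn, List.splitOnP_cons, if_neg (show ¬((c == '"') = true) from by
          simpa using hq)]
        rw [show List.splitOnP (· == '"') rest = rest.splitOn '"' from rfl, hS]
        rfl
      constructor
      · rw [show pvRunOut false none (c :: rest) = pvRunOut false none rest from by
            simp [pvRunOut, hq], ih.1, hsplit, hS]
        exact congrArg (List.flatMap pvScanSeg) (pvOdds_head h (c :: h) t)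
      · intro prev
        rw [show pvRunOut true prev (c :: rest)
              = pvEmit prev c ++ pvRunOut true (some c) rest from by
            simp [pvRunOut, hq], ih.2 (some c), hsplit, hS]
        simp only [List.headI, List.tail]
        rw [pvWith_cons]
        simp [pvWith, List.append_assoc]

-- ===== VERDICT (by name: the statement is the Claim_ definition above) =====
theorem extract_format_scanf_specifiers_spec : Claim_equal_extract_format_scanf_specifiers := by
  intro line _
  show extract_format_scanf_specifiers line = extract_format_scanf_specifiers_alt line
  unfold extract_format_scanf_specifiers extract_format_scanf_specifiers_alt
  rw [foldA line.toList [] false []]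
  simp only [List.getLast?_nil, List.nil_append]
  rw [(runOut_split line.toList).1,
      PySem.List.foldl_append_eq_flatMap pvScanSeg (pvOdds (line.toList.splitOn '"')) []]
  simp
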